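-- pv_equiv track=rewrite | github.com/ng3rdstmadgke/PyPractice | 20_3_recursion/recursion.py | forall
-- ===== SOURCE A (Python) =====
-- def forall(l):
--     if len(l) == 0:
--         return True
--     else:
--         ret = forall(l[1:])
--         if l[0] % 2 != 0:
--             ret = False
--         return ret
-- ===== SOURCE B (Python) =====
-- def forall(l):
--     ret = True
--     for x in reversed(l):
--         if x % 2 != 0:
--             ret = False
--     return ret
-- ===== Notes on version B (the rewrite author's own statement) =====
-- stated objective: faster
-- what changed: Replaces the recursion (which slices l[1:] at every level) with an iterative flag-accumulating loop over reversed(l), same right-to-left evaluation order and no short-circuit.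
import Mathlib
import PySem

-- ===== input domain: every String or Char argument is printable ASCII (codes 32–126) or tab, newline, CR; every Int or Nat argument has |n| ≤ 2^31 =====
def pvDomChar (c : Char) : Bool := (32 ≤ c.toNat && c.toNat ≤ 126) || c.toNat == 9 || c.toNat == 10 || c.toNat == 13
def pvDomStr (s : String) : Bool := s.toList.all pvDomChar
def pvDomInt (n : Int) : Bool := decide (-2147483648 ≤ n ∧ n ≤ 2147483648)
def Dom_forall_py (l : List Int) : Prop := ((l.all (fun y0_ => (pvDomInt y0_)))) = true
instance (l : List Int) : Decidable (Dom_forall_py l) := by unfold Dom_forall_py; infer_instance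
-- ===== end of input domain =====

-- ===== PORT A =====
-- Literal port of A: structural recursion on the list (l[1:] is the tail, l[0] the head).
def forall_py (l : List Int) : Bool :=
  match l with
  | [] => true
  | x :: xs =>
    let ret := forall_py xs
    if PySem.Int.mod x 2 ≠ 0 then false else ret

-- ===== PORT B =====
-- Port of B: iterative flag loop over reversed(l), no short-circuit.
def forall_py_alt (l : List Int) : Bool :=
  l.reverse.foldl (fun ret x => if PySem.Int.mod x 2 ≠ 0 then false else ret) true

-- ===== PRECONDITION & SPEC =====
def Spec_forall_py (l : List Int) (out : Bool) : Prop := out = forall_py_alt l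
instance (l : List Int) (out : Bool) : Decidable (Spec_forall_py l out) := by unfold Spec_forall_py; infer_instance

-- ===== CLAIM (what is proved, stated in full; the proofs are below) =====
def Claim_equal_forall_py : Prop := ∀ (l : List Int), Dom_forall_py l → Spec_forall_py l (forall_py l)

-- ===== LEMMAS AND PROOFS =====

-- ===== VERDICT (by name: the statement is the Claim_ definition above) =====
theorem forall_py_alt_eq (l : List Int) :
    forall_py_alt l = forall_py l := by
  induction l with
  | nil => rfl
  | cons x xs ih =>
    simp only [forall_py_alt, List.reverse_cons, List.foldl_append, List.foldl] at ih ⊢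
    rw [ih, forall_py]

theorem forall_py_spec : Claim_equal_forall_py := by
  intro l _
  unfold Spec_forall_py
  exact (forall_py_alt_eq l).symm
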